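-- pv_equiv track=rewrite | github.com/hn-on-fire/Python | Basic Projects/Time Calculator/time_calculator.py | add_hm
-- ===== SOURCE A (Python) =====
-- def add_hm(time_now, hours, minutes):
--     time_now[1] += minutes
--     if time_now[1] >= 60:
--         time_now[0] += 1
--         time_now[1] -= 60
--     time_now[0] += hours
--     add_day = 0
--     while time_now[0] >= 24:
--         time_now[0] -= 24
--         add_day += 1
--     return [add_day, time_now[0], time_now[1]]
-- ===== SOURCE B (Python) =====
-- def add_hm(time_now, hours, minutes):
--     m = time_now[1] + minutes
--     carry = 1 if m >= 60 else 0
--     m -= 60 * carry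
--     h = time_now[0] + hours + carry
--     add_day = max(h // 24, 0)
--     h -= 24 * add_day
--     # keep A's in-place mutation of time_now
--     time_now[0] = h
--     time_now[1] = m
--     return [add_day, h, m]
-- ===== Notes on version B (the rewrite author's own statement) =====
-- stated objective: simpler
-- what changed: Replaces the while-loop that repeatedly subtracts 24 with a closed-form floor division (max(h // 24, 0)), computing the result in straight-line arithmetic on locals.
-- outside the precondition, e.g. on add_hm([5], 1, 2): A raises IndexError, B raises IndexError
import Mathlib
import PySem

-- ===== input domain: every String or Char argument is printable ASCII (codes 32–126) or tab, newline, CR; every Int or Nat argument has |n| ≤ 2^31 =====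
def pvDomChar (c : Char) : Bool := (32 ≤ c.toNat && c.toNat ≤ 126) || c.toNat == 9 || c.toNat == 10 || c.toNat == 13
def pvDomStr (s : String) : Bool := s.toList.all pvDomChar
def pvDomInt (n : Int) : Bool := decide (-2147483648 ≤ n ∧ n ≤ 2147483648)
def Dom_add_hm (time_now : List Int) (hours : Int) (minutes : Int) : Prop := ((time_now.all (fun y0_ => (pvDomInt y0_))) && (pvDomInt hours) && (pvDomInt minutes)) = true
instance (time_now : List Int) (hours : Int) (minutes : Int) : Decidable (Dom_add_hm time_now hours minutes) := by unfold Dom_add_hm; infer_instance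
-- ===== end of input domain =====

-- B replaces A's repeated-subtraction while-loop by a closed-form floor-division day carry (objective: simpler); B performs the same in-place mutation of time_now as A.

-- ===== PORT A =====
-- while time_now[0] >= 24: time_now[0] -= 24; add_day += 1
def add_hm_while (h : Int) (add_day : Int) : Int × Int :=
  if 24 ≤ h then add_hm_while (h - 24) (add_day + 1) else (h, add_day)
termination_by h.toNat
decreasing_by omega

def add_hm (time_now : List Int) (hours : Int) (minutes : Int) : List Int :=
  let m1 := ((PySem.List.pyGet? time_now 1).getD 0) + minutes
  let h0 := (PySem.List.pyGet? time_now 0).getD 0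
  let hm := if m1 ≥ 60 then (h0 + 1, m1 - 60) else (h0, m1)
  let h2 := hm.1 + hours
  let r := add_hm_while h2 0
  [r.2, r.1, hm.2]

-- ===== PORT B =====
-- closed-form day carry: add_day = max(h // 24, 0) instead of the subtraction loop
def add_hm_alt (time_now : List Int) (hours : Int) (minutes : Int) : List Int :=
  let m := ((PySem.List.pyGet? time_now 1).getD 0) + minutes
  let carry : Int := if m ≥ 60 then 1 else 0
  let m2 := m - 60 * carry
  let h := ((PySem.List.pyGet? time_now 0).getD 0) + hours + carry
  let add_day := max (PySem.Int.floordiv h 24) 0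
  [add_day, h - 24 * add_day, m2]

-- ===== PRECONDITION & SPEC =====
-- A raises IndexError when the list has fewer than 2 elements; Pre_ excludes exactly those.
def Pre_add_hm (time_now : List Int) (hours : Int) (minutes : Int) : Prop := 2 ≤ time_now.length
instance (time_now : List Int) (hours : Int) (minutes : Int) : Decidable (Pre_add_hm time_now hours minutes) := by unfold Pre_add_hm; infer_instance
def pvWitness_add_hm : List Int × Int × Int := ([3, 25], 30, 90)

def Spec_add_hm (time_now : List Int) (hours : Int) (minutes : Int) (out : List Int) : Prop := out = add_hm_alt time_now hours minutes
instance (time_now : List Int) (hours : Int) (minutes : Int) (out : List Int) : Decidable (Spec_add_hm time_now hours minutes out) := by unfold Spec_add_hm; infer_instance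

-- ===== CLAIM (what is proved, stated in full; the proofs are below) =====
def Claim_equal_add_hm : Prop := ∀ (time_now : List Int) (hours : Int) (minutes : Int), Dom_add_hm time_now hours minutes → Pre_add_hm time_now hours minutes → Spec_add_hm time_now hours minutes (add_hm time_now hours minutes)

-- ===== LEMMAS AND PROOFS =====
theorem add_hm_while_eq (h a : Int) :
    add_hm_while h a = (h - 24 * max (PySem.Int.floordiv h 24) 0, a + max (PySem.Int.floordiv h 24) 0) := by
  rw [add_hm_while]
  split_ifs with hle
  · rw [add_hm_while_eq (h - 24) (a + 1)]
    have h1 : (1 : Int) ≤ PySem.Int.floordiv h 24 := by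
      rw [PySem.Int.le_floordiv_iff_mul_le (by norm_num)]; omega
    have h2 : PySem.Int.floordiv (h - 24) 24 = PySem.Int.floordiv h 24 - 1 := by
      rw [PySem.Int.floordiv_eq_iff_of_pos (by norm_num)]
      have := (PySem.Int.floordiv_eq_iff_of_pos (a := h) (b := 24) (q := PySem.Int.floordiv h 24) (by norm_num)).mp rfl
      have h3 := this.1; have h4 := this.2
      constructor <;> linarith
    rw [h2]
    have : max (PySem.Int.floordiv h 24 - 1) 0 = PySem.Int.floordiv h 24 - 1 := by omega
    rw [this]
    have : max (PySem.Int.floordiv h 24) 0 = PySem.Int.floordiv h 24 := by omega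
    rw [this]
    simp only [Prod.mk.injEq]
    constructor <;> ring
  · have h0 : PySem.Int.floordiv h 24 < 1 := by
      rw [PySem.Int.floordiv_lt_iff_lt_mul (by norm_num)]; omega
    have : max (PySem.Int.floordiv h 24) 0 = 0 := by omega
    rw [this]; norm_num
termination_by h.toNat
decreasing_by omega

-- ===== VERDICT (by name: the statement is the Claim_ definition above) =====
theorem add_hm_spec : Claim_equal_add_hm := by
  intro time_now hours minutes _ _
  unfold Spec_add_hm add_hm add_hm_alt
  simp only [add_hm_while_eq]
  split_ifs <;> simp only [List.cons.injEq, and_true] <;> refine ⟨?_, ?_, ?_⟩ <;> ring_nf
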